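-- pv_equiv track=rewrite | github.com/Latent-Infinity/liq-metrics | src/liq/metrics/labels.py | summarize_labels
-- ===== SOURCE A (Python) =====
-- from collections.abc import Iterable
--
-- def summarize_labels(labels: Iterable[int]) -> dict[str, int]:
--     """Count triple-barrier or meta-label outcomes.
--
--     Categorizes labels into positive (>0), negative (<0), and neutral (0).
--
--     Args:
--         labels: An iterable of integer labels representing trade outcomes.
--             Typically 1 for profit, -1 for loss, 0 for neutral/timeout.
--
--     Returns:
--         A dictionary with counts for 'positive', 'negative', and 'neutral'.
--
--     Raises:
--         TypeError: If any element in labels is not an integer.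
--
--     Examples:
--         >>> summarize_labels([1, -1, 0, 1, 0])
--         {'positive': 2, 'negative': 1, 'neutral': 2}
--         >>> summarize_labels([])
--         {'positive': 0, 'negative': 0, 'neutral': 0}
--     """
--     counts: dict[str, int] = {"positive": 0, "negative": 0, "neutral": 0}
--
--     for i, lbl in enumerate(labels):
--         if not isinstance(lbl, int) or isinstance(lbl, bool):
--             raise TypeError(
--                 f"All labels must be integers, got {type(lbl).__name__} at index {i}"
--             )
--
--         if lbl > 0:
--             counts["positive"] += 1
--         elif lbl < 0:
--             counts["negative"] += 1
--         else:
--             counts["neutral"] += 1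
--
--     return counts
-- ===== SOURCE B (Python) =====
-- def summarize_labels(labels):
--     lst = []
--     for i, lbl in enumerate(labels):
--         if not isinstance(lbl, int) or isinstance(lbl, bool):
--             raise TypeError(
--                 f"All labels must be integers, got {type(lbl).__name__} at index {i}"
--             )
--         lst.append(lbl)
--     positive = sum(1 for x in lst if x > 0)
--     negative = sum(1 for x in lst if x < 0)
--     neutral = len(lst) - positive - negative
--     return {"positive": positive, "negative": negative, "neutral": neutral}
-- ===== Notes on version B (the rewrite author's own statement) =====
-- stated objective: alternative
-- what changed: Replaces the single loop that increments a category counter in a dict per element with validation/materialization first, then two separate counting passes for positive and negative, computing neutral by subtraction from the length instead of counting zeros.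
import Mathlib
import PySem

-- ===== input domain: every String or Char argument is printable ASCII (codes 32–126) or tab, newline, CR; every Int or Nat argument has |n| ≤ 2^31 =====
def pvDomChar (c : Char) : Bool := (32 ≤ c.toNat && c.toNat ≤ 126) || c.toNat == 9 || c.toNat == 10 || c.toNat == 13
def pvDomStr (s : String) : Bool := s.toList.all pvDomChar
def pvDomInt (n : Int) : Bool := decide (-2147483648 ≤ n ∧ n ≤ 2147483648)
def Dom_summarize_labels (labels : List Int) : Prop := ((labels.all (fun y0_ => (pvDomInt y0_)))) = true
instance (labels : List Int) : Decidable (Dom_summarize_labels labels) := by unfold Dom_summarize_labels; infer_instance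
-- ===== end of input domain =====

-- B validates then counts positive and negative in two separate passes and derives neutral by
-- subtraction from the length, instead of A's single loop incrementing one of three dict counters.
-- Equal cost; the objective is an alternative decomposition.

-- ===== PORT A =====
-- one loop; each element bumps exactly one of the three counters in the dict
def summarize_labels (labels : List Int) : List (String × Int) :=
  (labels.foldl (fun counts lbl =>
      if lbl > 0 then counts.modify "positive" 0 (· + 1)
      else if lbl < 0 then counts.modify "negative" 0 (· + 1)
      else counts.modify "neutral" 0 (· + 1))
    (PySem.Dict.mk [("positive", (0 : Int)), ("negative", 0), ("neutral", 0)])).items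

-- ===== PORT B =====
-- (the isinstance validation loop of Source B is vacuous on List Int and materializes the input unchanged)
def summarize_labels_alt (labels : List Int) : List (String × Int) :=
  let lst := labels
  let positive : Int := lst.foldl (fun s x => if x > 0 then s + 1 else s) 0
  let negative : Int := lst.foldl (fun s x => if x < 0 then s + 1 else s) 0
  let neutral : Int := (lst.length : Int) - positive - negative
  [("positive", positive), ("negative", negative), ("neutral", neutral)]

-- ===== PRECONDITION & SPEC =====
def Spec_summarize_labels (labels : List Int) (out : List (String × Int)) : Prop := out = summarize_labels_alt labels
instance (labels : List Int) (out : List (String × Int)) : Decidable (Spec_summarize_labels labels out) := by unfold Spec_summarize_labels; infer_instance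

-- ===== CLAIM (what is proved, stated in full; the proofs are below) =====
def Claim_equal_summarize_labels : Prop := ∀ (labels : List Int), Dom_summarize_labels labels → Spec_summarize_labels labels (summarize_labels labels)

-- ===== LEMMAS AND PROOFS =====

-- A's loop, run from any literal three-counter dict, adds the three category counts
lemma loopA (labels : List Int) (p n z : Int) :
    labels.foldl (fun counts lbl =>
      if lbl > 0 then counts.modify "positive" 0 (· + 1)
      else if lbl < 0 then counts.modify "negative" 0 (· + 1)
      else counts.modify "neutral" 0 (· + 1))
      (PySem.Dict.mk [("positive", p), ("negative", n), ("neutral", z)]) =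
    PySem.Dict.mk [("positive", p + (labels.countP (fun x => 0 < x) : Int)),
                   ("negative", n + (labels.countP (fun x => x < 0) : Int)),
                   ("neutral", z + (labels.countP (fun x => x = 0) : Int))] := by
  induction labels generalizing p n z with
  | nil => simp [List.countP]
  | cons h t ih =>
    simp only [List.foldl_cons, List.countP_cons]
    by_cases h1 : h > 0
    · have : (PySem.Dict.mk [("positive", p), ("negative", n), ("neutral", z)]).modify "positive" 0 (· + 1)
          = PySem.Dict.mk [("positive", p + 1), ("negative", n), ("neutral", z)] := by
        simp [PySem.Dict.modify, PySem.Dict.contains, PySem.Dict.insert, PySem.Dict.getD, PySem.Dict.get?]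
      have hne : ¬ h = 0 := by omega
      have h2 : ¬ h < 0 := by omega
      rw [if_pos h1, this, ih]
      simp [h1, h2, hne]
      ring_nf
    · by_cases h2 : h < 0
      · have : (PySem.Dict.mk [("positive", p), ("negative", n), ("neutral", z)]).modify "negative" 0 (· + 1)
            = PySem.Dict.mk [("positive", p), ("negative", n + 1), ("neutral", z)] := by
          simp [PySem.Dict.modify, PySem.Dict.contains, PySem.Dict.insert, PySem.Dict.getD, PySem.Dict.get?]
        have hne : ¬ h = 0 := by omega
        rw [if_neg h1, if_pos h2, this, ih]
        simp [h1, h2, hne]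
        ring_nf
      · have : (PySem.Dict.mk [("positive", p), ("negative", n), ("neutral", z)]).modify "neutral" 0 (· + 1)
            = PySem.Dict.mk [("positive", p), ("negative", n), ("neutral", z + 1)] := by
          simp [PySem.Dict.modify, PySem.Dict.contains, PySem.Dict.insert, PySem.Dict.getD, PySem.Dict.get?]
        have he : h = 0 := by omega
        rw [if_neg h1, if_neg h2, this, ih]
        simp [he]
        ring_nf

-- B's counting pass is countP
lemma loopB (labels : List Int) (P : Int → Prop) [DecidablePred P] (s : Int) :
    labels.foldl (fun s x => if P x then s + 1 else s) s = s + (labels.countP (fun x => P x) : Int) := by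
  induction labels generalizing s with
  | nil => simp [List.countP]
  | cons h t ih =>
    simp only [List.foldl_cons, List.countP_cons]
    by_cases hP : P h <;> simp [hP, ih] <;> ring

-- the three categories partition the list
lemma count_partition (labels : List Int) :
    (labels.countP (fun x => x = 0) : Int) =
      (labels.length : Int) - (labels.countP (fun x => 0 < x) : Int) - (labels.countP (fun x => x < 0) : Int) := by
  induction labels with
  | nil => simp [List.countP]
  | cons h t ih =>
    simp only [List.countP_cons, List.length_cons]
    rcases lt_trichotomy h 0 with h2 | h0 | h1
    · simp [h2, not_lt.mpr (le_of_lt h2), show ¬ h = 0 by omega]; omega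
    · simp [h0]; omega
    · simp [h1, not_lt.mpr (le_of_lt h1), show ¬ h = 0 by omega]; omega

-- ===== VERDICT (by name: the statement is the Claim_ definition above) =====
theorem summarize_labels_spec : Claim_equal_summarize_labels := by
  intro labels _
  show summarize_labels labels = summarize_labels_alt labels
  unfold summarize_labels summarize_labels_alt
  simp only [loopA, loopB, count_partition]
  norm_num
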